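-- pv_equiv track=rewrite | github.com/VincentMarquez/Bubbles-Network. | apep_bubble_code.py | _improve_structure
-- ===== SOURCE A (Python) =====
-- from typing import Dict, Any, List, Optional, Tuple, Set
--
-- def _improve_structure(code: str, context: Dict) -> str:
--     """Improve code structure for readability and maintainability."""
--     # Basic restructuring: add blank lines between sections, ensure consistent indentation
--     lines = code.split("\n")
--     structured_lines = []
--     in_function = False
--     for line in lines:
--         if line.strip().startswith("def "):
--             if in_function:
--                 structured_lines.append("")  # Blank line before new function
--             in_function = True
--         structured_lines.append(line)
--     return "\n".join(structured_lines)
-- ===== SOURCE B (Python) =====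
-- def _improve_structure(code: str, context: dict) -> str:
--     """Improve code structure for readability and maintainability."""
--     # Partition the lines into blocks: a new block starts at each "def " line
--     # after the first one; then join blocks with a blank line between them.
--     segments = [[]]
--     seen_def = False
--     for line in code.split("\n"):
--         is_def = line.strip().startswith("def ")
--         if is_def and seen_def:
--             segments.append([line])
--         else:
--             segments[-1].append(line)
--         seen_def = seen_def or is_def
--     return "\n\n".join("\n".join(seg) for seg in segments)
-- ===== Notes on version B (the rewrite author's own statement) =====
-- stated objective: alternative
-- what changed: Instead of appending lines to one flat list and inserting an empty-string line before each def after the first, B partitions the lines into blocks (a new block starts at each later def) and joins blocks with a blank-line separator via two nested joins.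
import Mathlib
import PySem

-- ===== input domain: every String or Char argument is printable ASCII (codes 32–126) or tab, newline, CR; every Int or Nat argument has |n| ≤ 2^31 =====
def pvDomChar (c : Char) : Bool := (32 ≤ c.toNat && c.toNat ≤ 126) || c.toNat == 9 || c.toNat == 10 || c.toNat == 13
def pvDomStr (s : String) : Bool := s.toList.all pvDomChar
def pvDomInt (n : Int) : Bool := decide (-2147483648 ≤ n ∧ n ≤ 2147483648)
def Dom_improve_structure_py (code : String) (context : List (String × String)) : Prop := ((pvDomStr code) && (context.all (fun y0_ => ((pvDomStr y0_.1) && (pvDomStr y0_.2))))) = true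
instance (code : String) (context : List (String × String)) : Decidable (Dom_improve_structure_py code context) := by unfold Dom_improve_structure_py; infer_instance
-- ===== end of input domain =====

-- B reorganises A's flat "insert a blank line before each later def" scan into
-- a partition-into-blocks-then-join-blocks-with-a-blank-line shape (alternative decomposition, same cost).


-- ===== PORT A =====
-- one loop iteration of A: append "" before a def line when already inside a function, then append the line
def pvStepA (st : List String × Bool) (line : String) : List String × Bool :=
  if PySem.Str.startswith (PySem.Str.strip line) "def " then
    ((if st.2 then st.1 ++ [""] else st.1) ++ [line], true)
  else (st.1 ++ [line], st.2)

def improve_structure_py (code : String) (context : List (String × String)) : String :=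
  let lines := (PySem.Chars.splitOn code.toList "\n".toList).map String.ofList
  let st := lines.foldl pvStepA ([], false)
  PySem.Str.join "\n" st.1

-- ===== PORT B =====
-- segments[-1].append(line)
def pvAppendLast : List (List String) → String → List (List String)
  | [], l => [[l]]
  | [s], l => [s ++ [l]]
  | s :: t :: rest, l => s :: pvAppendLast (t :: rest) l

-- one loop iteration of B: start a new block at a def line once a def was seen, else extend the last block
def pvStepB (st : List (List String) × Bool) (line : String) : List (List String) × Bool :=
  let isdef := PySem.Str.startswith (PySem.Str.strip line) "def "
  if isdef && st.2 then (st.1 ++ [[line]], true)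
  else (pvAppendLast st.1 line, st.2 || isdef)

def improve_structure_py_alt (code : String) (context : List (String × String)) : String :=
  let lines := (PySem.Chars.splitOn code.toList "\n".toList).map String.ofList
  let st := lines.foldl pvStepB ([[]], false)
  PySem.Str.join "\n\n" (st.1.map (PySem.Str.join "\n"))

-- ===== PRECONDITION & SPEC =====
def Spec_improve_structure_py (code : String) (context : List (String × String)) (out : String) : Prop := out = improve_structure_py_alt code context
instance (code : String) (context : List (String × String)) (out : String) : Decidable (Spec_improve_structure_py code context out) := by unfold Spec_improve_structure_py; infer_instance

-- ===== CLAIM (what is proved, stated in full; the proofs are below) =====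
def Claim_equal_improve_structure_py : Prop := ∀ (code : String) (context : List (String × String)), Dom_improve_structure_py code context → Spec_improve_structure_py code context (improve_structure_py code context)

-- ===== LEMMAS AND PROOFS =====
-- glue: B's block list flattened the way A's flat list looks (a "" line between blocks)
def pvGlue : List (List String) → List String
  | [] => []
  | [s] => s
  | s :: t :: rest => s ++ [""] ++ pvGlue (t :: rest)

lemma pvGlue_cons_ne (s : List String) (xs : List (List String)) (h : xs ≠ []) :
    pvGlue (s :: xs) = s ++ [""] ++ pvGlue xs := by
  cases xs with
  | nil => exact absurd rfl h
  | cons t rest => rfl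

lemma pvAppendLast_ne_nil (segs : List (List String)) (l : String) : pvAppendLast segs l ≠ [] := by
  match segs with
  | [] => simp [pvAppendLast]
  | [s] => simp [pvAppendLast]
  | s :: t :: rest => simp [pvAppendLast]

lemma pvGlue_appendLast (segs : List (List String)) (l : String) :
    pvGlue (pvAppendLast segs l) = pvGlue segs ++ [l] := by
  induction segs with
  | nil => rfl
  | cons s rest ih =>
    cases rest with
    | nil => rfl
    | cons t rest2 =>
      have h1 : pvAppendLast (t :: rest2) l ≠ [] := pvAppendLast_ne_nil _ _
      calc pvGlue (pvAppendLast (s :: t :: rest2) l)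
          = pvGlue (s :: pvAppendLast (t :: rest2) l) := rfl
        _ = s ++ [""] ++ pvGlue (pvAppendLast (t :: rest2) l) := pvGlue_cons_ne _ _ h1
        _ = s ++ [""] ++ (pvGlue (t :: rest2) ++ [l]) := by rw [ih]
        _ = pvGlue (s :: t :: rest2) ++ [l] := by
              rw [pvGlue_cons_ne s (t :: rest2) (by simp)]; simp

lemma pvGlue_append_single (segs : List (List String)) (x : List String) (h : segs ≠ []) :
    pvGlue (segs ++ [x]) = pvGlue segs ++ [""] ++ x := by
  induction segs with
  | nil => exact absurd rfl h
  | cons s rest ih =>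
    cases rest with
    | nil => rfl
    | cons t rest2 =>
      calc pvGlue ((s :: t :: rest2) ++ [x])
          = s ++ [""] ++ pvGlue ((t :: rest2) ++ [x]) := pvGlue_cons_ne s ((t :: rest2) ++ [x]) (by simp)
        _ = s ++ [""] ++ (pvGlue (t :: rest2) ++ [""] ++ x) := by rw [ih (by simp)]
        _ = pvGlue (s :: t :: rest2) ++ [""] ++ x := by
              rw [pvGlue_cons_ne s (t :: rest2) (by simp)]; simp

lemma pvAppendLast_mem_ne_nil (segs : List (List String)) (l : String)
    (h : ∀ s ∈ segs, s ≠ []) : ∀ s ∈ pvAppendLast segs l, s ≠ [] := by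
  induction segs with
  | nil => simp [pvAppendLast]
  | cons s rest ih =>
    cases rest with
    | nil => simp [pvAppendLast]
    | cons t rest2 =>
      intro u hu
      simp only [pvAppendLast, List.mem_cons] at hu
      rcases hu with h1 | h2
      · exact h1 ▸ h s (by simp)
      · exact ih (fun v hv => h v (List.mem_cons_of_mem _ hv)) u h2

-- the loop invariant: A's accumulator is the glued form of B's block list, flags agree,
-- B's block list stays a nonempty list of nonempty blocks
lemma pvLoop (lines : List String) : ∀ (segs : List (List String)) (inf : Bool),
    segs ≠ [] → (∀ s ∈ segs, s ≠ []) →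
    lines.foldl pvStepA (pvGlue segs, inf) =
      (pvGlue (lines.foldl pvStepB (segs, inf)).1, (lines.foldl pvStepB (segs, inf)).2)
    ∧ (lines.foldl pvStepB (segs, inf)).1 ≠ []
    ∧ ∀ s ∈ (lines.foldl pvStepB (segs, inf)).1, s ≠ [] := by
  induction lines with
  | nil => intro segs inf h1 h2; exact ⟨rfl, h1, h2⟩
  | cons l rest ih =>
    intro segs inf h1 h2
    simp only [List.foldl_cons]
    by_cases hc : PySem.Chars.startswith (PySem.Chars.strip l.toList) ['d', 'e', 'f', ' '] = true
    · cases inf with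
      | true =>
        have hA : pvStepA (pvGlue segs, true) l = (pvGlue segs ++ [""] ++ [l], true) := by
          simp [pvStepA, hc]
        have hB : pvStepB (segs, true) l = (segs ++ [[l]], true) := by
          simp [pvStepB, hc]
        rw [hA, hB, ← pvGlue_append_single segs [l] h1]
        exact ih (segs ++ [[l]]) true (by simp)
          (by intro s hs
              rcases List.mem_append.mp hs with h | h
              · exact h2 s h
              · simp at h; simp [h])
      | false =>
        have hA : pvStepA (pvGlue segs, false) l = (pvGlue segs ++ [l], true) := by
          simp [pvStepA, hc]
        have hB : pvStepB (segs, false) l = (pvAppendLast segs l, true) := by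
          simp [pvStepB, hc]
        rw [hA, hB, ← pvGlue_appendLast segs l]
        exact ih _ true (pvAppendLast_ne_nil _ _) (pvAppendLast_mem_ne_nil _ _ h2)
    · rw [Bool.not_eq_true] at hc
      have hA : pvStepA (pvGlue segs, inf) l = (pvGlue segs ++ [l], inf) := by
        simp [pvStepA, hc]
      have hB : pvStepB (segs, inf) l = (pvAppendLast segs l, inf) := by
        simp [pvStepB, hc]
      rw [hA, hB, ← pvGlue_appendLast segs l]
      exact ih _ inf (pvAppendLast_ne_nil _ _) (pvAppendLast_mem_ne_nil _ _ h2)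

-- joining a concatenation of two nonempty lists of pieces
lemma pvJoinAppend (sep : List Char) : ∀ (a b : List (List Char)), a ≠ [] → b ≠ [] →
    PySem.Chars.join sep (a ++ b) = PySem.Chars.join sep a ++ sep ++ PySem.Chars.join sep b := by
  intro a
  induction a with
  | nil => intro b h _; exact absurd rfl h
  | cons x xs ih =>
    intro b _ hb
    cases xs with
    | nil =>
      cases b with
      | nil => exact absurd rfl hb
      | cons y ys =>
        rw [List.singleton_append, PySem.Chars.join_cons_cons, PySem.Chars.join_singleton]
    | cons x2 xs2 =>
      rw [show (x :: x2 :: xs2) ++ b = x :: x2 :: (xs2 ++ b) from rfl,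
          PySem.Chars.join_cons_cons, PySem.Chars.join_cons_cons,
          show x2 :: (xs2 ++ b) = (x2 :: xs2) ++ b from rfl,
          ih b (by simp) hb]
      simp

lemma pvGlue_ne_nil (t : List String) (rest : List (List String)) (h : t ≠ []) :
    pvGlue (t :: rest) ≠ [] := by
  cases rest with
  | nil => simpa [pvGlue]
  | cons u us => rw [pvGlue_cons_ne _ _ (by simp)]; simp

-- joining the glued flat list with "\n" equals joining the "\n"-joined blocks with "\n\n"
lemma pvJoinGlue : ∀ (segs : List (List String)), (∀ s ∈ segs, s ≠ []) →
    PySem.Str.join "\n" (pvGlue segs) =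
      PySem.Str.join "\n\n" (segs.map (PySem.Str.join "\n")) := by
  intro segs
  induction segs with
  | nil =>
    intro _
    apply String.toList_inj.mp
    simp [PySem.Str.toList_join, pvGlue, PySem.Chars.join_nil]
  | cons s rest ih =>
    intro h
    cases rest with
    | nil =>
      apply String.toList_inj.mp
      simp only [pvGlue, List.map_cons, List.map_nil, PySem.Str.toList_join,
        PySem.Chars.join_singleton]
    | cons t rest2 =>
      have hs : s ≠ [] := h s (by simp)
      have ht : t ≠ [] := h t (by simp)
      have hglue : pvGlue (t :: rest2) ≠ [] := pvGlue_ne_nil t rest2 ht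
      have hIH := congrArg String.toList (ih (fun v hv => h v (List.mem_cons_of_mem _ hv)))
      simp only [PySem.Str.toList_join, List.map_cons] at hIH
      apply String.toList_inj.mp
      rw [pvGlue_cons_ne s (t :: rest2) (by simp)]
      rw [PySem.Str.toList_join, PySem.Str.toList_join]
      rw [show List.map String.toList (s ++ [""] ++ pvGlue (t :: rest2)) =
            List.map String.toList s ++ (([[]] : List (List Char)) ++ List.map String.toList (pvGlue (t :: rest2))) from by simp]
      rw [pvJoinAppend _ (List.map String.toList s) _ (by simpa) (by simp)]
      rw [pvJoinAppend _ ([[]] : List (List Char)) (List.map String.toList (pvGlue (t :: rest2))) (by simp) (by simpa)]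
      rw [PySem.Chars.join_singleton]
      simp only [List.map_cons, PySem.Str.toList_join]
      rw [PySem.Chars.join_cons_cons, ← hIH]
      simp [List.append_assoc]

-- ===== VERDICT (by name: the statement is the Claim_ definition above) =====
theorem improve_structure_py_spec : Claim_equal_improve_structure_py := by
  intro code context _
  unfold Spec_improve_structure_py improve_structure_py improve_structure_py_alt
  cases hl : (PySem.Chars.splitOn code.toList "\n".toList).map String.ofList with
  | nil =>
    simp only [List.foldl_nil]
    apply String.toList_inj.mp
    simp [PySem.Str.toList_join, PySem.Chars.join_nil, PySem.Chars.join_singleton]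
  | cons l rest =>
    simp only [List.foldl_cons]
    have hc1 : pvStepA (([] : List String), false) l =
        ([l], PySem.Chars.startswith (PySem.Chars.strip l.toList) ['d', 'e', 'f', ' ']) := by
      by_cases hc : PySem.Chars.startswith (PySem.Chars.strip l.toList) ['d', 'e', 'f', ' '] = true
      · simp [pvStepA, hc]
      · rw [Bool.not_eq_true] at hc; simp [pvStepA, hc]
    have hc2 : pvStepB (([[]] : List (List String)), false) l =
        ([[l]], PySem.Chars.startswith (PySem.Chars.strip l.toList) ['d', 'e', 'f', ' ']) := by
      simp [pvStepB, pvAppendLast]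
    rw [hc1, hc2]
    obtain ⟨h1, _, h3⟩ := pvLoop rest [[l]] (PySem.Chars.startswith (PySem.Chars.strip l.toList) ['d', 'e', 'f', ' '])
      (by simp) (by simp)
    have h1' : List.foldl pvStepA ([l], PySem.Chars.startswith (PySem.Chars.strip l.toList) ['d', 'e', 'f', ' ']) rest =
        (pvGlue (List.foldl pvStepB ([[l]], PySem.Chars.startswith (PySem.Chars.strip l.toList) ['d', 'e', 'f', ' ']) rest).1,
         (List.foldl pvStepB ([[l]], PySem.Chars.startswith (PySem.Chars.strip l.toList) ['d', 'e', 'f', ' ']) rest).2) := by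
      simpa [pvGlue] using h1
    rw [h1']
    exact pvJoinGlue _ h3
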